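-- pv_equiv track=rewrite | github.com/dilipksahu/Python-Programming-Example | Dictionary Programs/kthNonRepeatCharInString.py | kthNonRepeat
-- ===== SOURCE A (Python) =====
-- from collections import OrderedDict
--
-- def kthNonRepeat(input, k):
--     # OrderedDict returns a dictionary data
--         # structure having characters of input
--     # string as keys in the same order they
--         # were inserted and 0 as their default value
--     dic = OrderedDict.fromkeys(input, 0)
--
--     for ch in input:
--         dic[ch] += 1
--
--     nonRepeatList = [ key for key,value in dic.items() if value == 1]
--
--     if len(nonRepeatList) < k:
--         return "Less than k non-repeating characters in input"
--     else:
--         return nonRepeatList[k-1]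
-- ===== SOURCE B (Python) =====
-- def kthNonRepeat(input, k):
--     # One-pass online elimination: keep the characters seen exactly once, in
--     # order; the first time a character repeats, drop it and blacklist it.
--     once = []
--     repeated = set()
--     for ch in input:
--         if ch in repeated:
--             continue
--         if ch in once:
--             once.remove(ch)
--             repeated.add(ch)
--         else:
--             once.append(ch)
--     if len(once) < k:
--         return "Less than k non-repeating characters in input"
--     return once[k - 1]
-- ===== Notes on version B (the rewrite author's own statement) =====
-- stated objective: alternative
-- what changed: Replaces A's staged count-table pipeline (build OrderedDict keys, second counting loop, filter items) by a single-pass online elimination: an ordered list of characters seen exactly once plus a blacklist set; a repeating character is removed on its second occurrence and blacklisted, so no frequency table is ever built.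
-- outside the precondition, e.g. on kthNonRepeat('ab', -2): A raises IndexError, B raises IndexError
import Mathlib
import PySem

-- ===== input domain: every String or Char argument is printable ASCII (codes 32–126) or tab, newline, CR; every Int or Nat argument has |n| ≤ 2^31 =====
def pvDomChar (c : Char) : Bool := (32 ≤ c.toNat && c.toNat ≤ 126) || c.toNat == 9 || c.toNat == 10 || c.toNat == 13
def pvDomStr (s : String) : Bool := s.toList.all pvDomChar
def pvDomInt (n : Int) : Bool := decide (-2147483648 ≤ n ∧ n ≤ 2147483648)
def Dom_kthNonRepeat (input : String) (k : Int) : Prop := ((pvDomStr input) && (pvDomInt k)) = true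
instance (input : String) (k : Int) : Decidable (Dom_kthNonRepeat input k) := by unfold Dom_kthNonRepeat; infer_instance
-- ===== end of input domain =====

-- B replaces A's staged frequency-table pipeline by a single-pass online
-- elimination (ordered once-list + blacklist set); same guard, same k-1 index.

-- ===== PORT A =====
-- A builds dic = OrderedDict.fromkeys(input, 0), counts every character
-- (dic[ch] += 1; the key always exists, so 'modify' with default 0 is exact),
-- filters items with value 1, then guards and indexes with k-1.
def kthNonRepeat (input : String) (k : Int) : String :=
  let l := input.toList
  let dic0 : PySem.Dict Char Int := l.foldl (fun d c => d.insert c 0) PySem.Dict.empty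
  let dic := l.foldl (fun d c => d.modify c 0 (· + 1)) dic0
  let nonRepeatList := (dic.items.filter (fun p => p.2 == 1)).map (·.1)
  if (nonRepeatList.length : Int) < k then
    "Less than k non-repeating characters in input"
  else
    match PySem.List.pyGet? nonRepeatList (k - 1) with
    | some c => String.ofList [c]
    | none => ""   -- IndexError in Python; excluded by Pre_

-- ===== PORT B =====
-- one loop iteration of Source B: skip blacklisted ch; a second occurrence is
-- removed from 'once' (list.remove on a present element, so getD is exact)
-- and blacklisted; a first occurrence is appended.
def stepB (st : List Char × PySem.Set Char) (ch : Char) : List Char × PySem.Set Char :=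
  if PySem.Set.contains st.2 ch then st
  else if st.1.contains ch then ((PySem.List.remove? st.1 ch).getD st.1, PySem.Set.add st.2 ch)
  else (st.1 ++ [ch], st.2)

def kthNonRepeat_alt (input : String) (k : Int) : String :=
  let st := input.toList.foldl stepB ([], PySem.Set.empty)
  if (st.1.length : Int) < k then
    "Less than k non-repeating characters in input"
  else
    match PySem.List.pyGet? st.1 (k - 1) with
    | some c => String.ofList [c]
    | none => ""   -- IndexError in Python; excluded by Pre_

-- ===== PRECONDITION & SPEC =====
-- Excludes exactly the inputs where Python raises IndexError: k ≤ -m (with m the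
-- number of characters occurring exactly once), where nonRepeatList[k-1] indexes
-- before the start of the list.
def Pre_kthNonRepeat (input : String) (k : Int) : Prop :=
  1 ≤ k + ((input.toList.filter (fun c => input.toList.count c == 1)).length : Int)
instance (input : String) (k : Int) : Decidable (Pre_kthNonRepeat input k) := by
  unfold Pre_kthNonRepeat; infer_instance
def pvWitness_kthNonRepeat : String × Int := ("aab", 1)

def Spec_kthNonRepeat (input : String) (k : Int) (out : String) : Prop := out = kthNonRepeat_alt input k
instance (input : String) (k : Int) (out : String) : Decidable (Spec_kthNonRepeat input k out) := by unfold Spec_kthNonRepeat; infer_instance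

-- ===== CLAIM (what is proved, stated in full; the proofs are below) =====
def Claim_equal_kthNonRepeat : Prop := ∀ (input : String) (k : Int), Dom_kthNonRepeat input k → Pre_kthNonRepeat input k → Spec_kthNonRepeat input k (kthNonRepeat input k)

-- ===== LEMMAS AND PROOFS =====

-- ---- A side: the count table yields the count-1 characters in string order ----

-- fromkeys: every default lookup is 0 (keys present map to 0, absent keys default to 0)
theorem getD_fromkeys_zero (l : List Char) (d : PySem.Dict Char Int)
    (h : ∀ c, d.getD c 0 = 0) (x : Char) :
    (l.foldl (fun d c => d.insert c (0:Int)) d).getD x 0 = 0 := by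
  induction l generalizing d with
  | nil => simpa using h x
  | cons a t ih =>
      simp only [List.foldl_cons]
      exact ih _ (fun c => by rw [PySem.Dict.getD_insert]; split <;> simp [h])

-- A's final dict: keys = first-occurrence dedup of input, value = count
theorem dicA_keys (l : List Char) :
    ((l.foldl (fun d c => d.modify c 0 (· + 1))
        (l.foldl (fun d c => d.insert c (0:Int)) PySem.Dict.empty)).keys)
      = PySem.Set.ofList l := by
  rw [PySem.Dict.keys_foldl_modify, PySem.Dict.keys_foldl_insert]
  rw [PySem.Dict.keys_empty, PySem.Set.update_nil_left]
  rw [PySem.Set.update_eq_append_filter]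
  have h0 : ((PySem.Set.ofList l).filter (fun y => !(PySem.Set.contains (PySem.Set.ofList l) y))) = [] := by
    apply List.filter_eq_nil_iff.mpr
    intro a ha
    simp only [Bool.not_eq_true', Bool.not_eq_false]
    exact (PySem.Set.contains_iff (PySem.Set.ofList l) a).mpr ha
  rw [h0, List.append_nil]

theorem dicA_getD (l : List Char) (x : Char) :
    ((l.foldl (fun d c => d.modify c 0 (· + 1))
        (l.foldl (fun d c => d.insert c (0:Int)) PySem.Dict.empty)).getD x 0)
      = (l.count x : Int) := by
  rw [PySem.Dict.getD_foldl_modify_add_one]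
  rw [getD_fromkeys_zero l _ (fun c => PySem.Dict.getD_empty c 0) x]
  ring

theorem dicA_items (l : List Char) :
    ((l.foldl (fun d c => d.modify c 0 (· + 1))
        (l.foldl (fun d c => d.insert c (0:Int)) PySem.Dict.empty)).items)
      = (PySem.Set.ofList l).map (fun c => (c, (l.count c : Int))) := by
  set d := (l.foldl (fun d c => d.modify c 0 (· + 1))
      (l.foldl (fun d c => d.insert c (0:Int)) PySem.Dict.empty)) with hd
  have hnd : d.keys.Nodup := by
    rw [hd, dicA_keys]; exact PySem.Set.nodup_ofList l
  rw [PySem.Dict.items_eq_map_keys d hnd 0]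
  rw [hd, dicA_keys]
  exact List.map_congr_left (fun c _ => by rw [← hd, dicA_getD])

-- discard of a non-member is the identity
theorem discard_not_mem {s : List Char} {x : Char} (h : x ∉ s) :
    PySem.Set.discard s x = s := by
  show s.filter (fun y => y != x) = s
  apply List.filter_eq_self.mpr
  intro a ha
  have hax : a ≠ x := fun e => h (e ▸ ha)
  simp [hax]

theorem filter_discard (s : List Char) (x : Char) (p : Char → Bool) (hp : p x = false) :
    (PySem.Set.discard s x).filter p = s.filter p := by
  show (s.filter (fun y => y != x)).filter p = s.filter p
  rw [List.filter_filter]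
  apply List.filter_congr
  intro a _
  by_cases hax : a = x
  · subst hax; simp [hp]
  · simp [hax]

-- filtering by a property true only of count-≤-1 characters gives the same list
-- on the first-occurrence dedup as on the original string
theorem ofList_filter_eq (l : List Char) (p : Char → Bool)
    (h : ∀ c, p c = true → l.count c ≤ 1) :
    (PySem.Set.ofList l).filter p = l.filter p := by
  induction l with
  | nil => rfl
  | cons a t ih =>
      rw [PySem.Set.ofList_cons]
      by_cases hpa : p a = true
      · have hat : a ∉ t := by
          have := h a hpa
          simp [List.count_cons_self] at this
          exact List.count_eq_zero.mp this
        have hnot : a ∉ PySem.Set.ofList t := fun hm => hat ((PySem.Set.mem_ofList t a).mp hm)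
        rw [discard_not_mem hnot]
        simp only [List.filter_cons, hpa]
        rw [ih (fun c hc => by have := h c hc; rw [List.count_cons] at this; omega)]
      · have hpa' : p a = false := by simpa using hpa
        simp only [List.filter_cons, hpa']
        rw [filter_discard _ _ _ hpa']
        exact ih (fun c hc => by have := h c hc; rw [List.count_cons] at this; omega)

-- A's nonRepeatList is the count-1 characters of the input, in string order
theorem listsA (input : String) :
    ((((input.toList.foldl (fun d c => d.modify c 0 (· + 1))
        (input.toList.foldl (fun d c => d.insert c (0:Int)) PySem.Dict.empty)).items).filter
          (fun p => p.2 == 1)).map (·.1))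
      = input.toList.filter (fun c => input.toList.count c == 1) := by
  rw [dicA_items]
  rw [List.filter_map, List.map_map]
  have : ((fun p => p.2 == (1:Int)) ∘ fun c => (c, (input.toList.count c : Int)))
      = fun c => input.toList.count c == 1 := by
    funext c
    by_cases h : input.toList.count c = 1 <;> simp [h]
  rw [this]
  have : ((fun p => p.1) ∘ fun c => (c, (input.toList.count c : Int))) = id := rfl
  rw [this, List.map_id]
  apply ofList_filter_eq
  intro c hc
  simp at hc
  omega

-- ---- B side: the one-pass elimination also yields the count-1 characters ----

theorem count_append_singleton (p : List Char) (a b : Char) :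
    (p ++ [a]).count b = p.count b + if b = a then 1 else 0 := by
  by_cases h : b = a <;> simp [List.count_append, List.count_eq_zero, h]

-- the once-list p.filter (count == 1) has no duplicates
theorem nodup_onceList (p : List Char) :
    (p.filter (fun c => p.count c == 1)).Nodup := by
  apply List.nodup_iff_count_le_one.mpr
  intro a
  by_cases ha : (p.count a == 1) = true
  · have h1 : (p.filter (fun c => p.count c == 1)).count a ≤ p.count a := by
      have := List.filter_sublist (p := fun c => p.count c == 1) (l := p)
      exact this.count_le a
    simp at ha; omega
  · have : a ∉ p.filter (fun c => p.count c == 1) := by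
      intro hm
      exact ha (List.mem_filter.mp hm).2
    simp [List.count_eq_zero.mpr this]

-- pushing a char whose count is already ≥ 2 leaves the count-1 filter unchanged
theorem filter_push_ge2 (p : List Char) (a : Char) (h : 2 ≤ p.count a) :
    (p ++ [a]).filter (fun c => (p ++ [a]).count c == 1)
      = p.filter (fun c => p.count c == 1) := by
  rw [List.filter_append]
  have ha : ((p ++ [a]).count a == 1) = false := by
    rw [count_append_singleton]; simp; omega
  simp only [List.filter_cons, List.filter_nil, ha, Bool.false_eq_true, if_false, List.append_nil]
  apply List.filter_congr
  intro c _
  by_cases hc : c = a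
  · subst hc; rw [ha]; simp; omega
  · rw [count_append_singleton]; simp [hc]

-- pushing a char seen exactly once removes it from the count-1 filter
theorem filter_push_eq1 (p : List Char) (a : Char) (h : p.count a = 1) :
    (p ++ [a]).filter (fun c => (p ++ [a]).count c == 1)
      = (p.filter (fun c => p.count c == 1)).erase a := by
  rw [(nodup_onceList p).erase_eq_filter a, List.filter_filter, List.filter_append]
  have ha : ((p ++ [a]).count a == 1) = false := by
    rw [count_append_singleton]; simp; omega
  simp only [List.filter_cons, List.filter_nil, ha, Bool.false_eq_true, if_false, List.append_nil]
  apply List.filter_congr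
  intro c _
  by_cases hc : c = a
  · subst hc; rw [ha]; simp
  · rw [count_append_singleton]; simp [hc]

-- pushing an unseen char appends it to the count-1 filter
theorem filter_push_eq0 (p : List Char) (a : Char) (h : p.count a = 0) :
    (p ++ [a]).filter (fun c => (p ++ [a]).count c == 1)
      = p.filter (fun c => p.count c == 1) ++ [a] := by
  rw [List.filter_append]
  have ha : ((p ++ [a]).count a == 1) = true := by
    rw [count_append_singleton]; simp [h]
  simp only [List.filter_cons, List.filter_nil, ha, if_true]
  congr 1
  apply List.filter_congr
  intro c hc
  by_cases hca : c = a
  · subst hca; exact absurd (List.count_eq_zero.mp h) (fun hn => hn hc)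
  · rw [count_append_singleton]; simp [hca]

-- loop invariant of B's fold: after consuming prefix p, 'once' is exactly the
-- count-1 characters of p in order, and the blacklist holds the count-≥2 ones
theorem foldB_inv (l : List Char) : ∀ (p once : List Char) (rep : PySem.Set Char),
    once = p.filter (fun c => p.count c == 1) →
    (∀ c, PySem.Set.contains rep c = decide (2 ≤ p.count c)) →
    (l.foldl stepB (once, rep)).1 = (p ++ l).filter (fun c => (p ++ l).count c == 1) := by
  induction l with
  | nil => intro p once rep h1 _; simpa using h1
  | cons a t ih =>
      intro p once rep h1 h2
      rw [List.foldl_cons]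
      have hmem : once.contains a = true ↔ p.count a = 1 := by
        rw [List.contains_iff_mem, h1, List.mem_filter]
        constructor
        · intro ⟨_, hc⟩; simpa using hc
        · intro hc
          exact ⟨List.count_pos_iff.mp (by omega), by simp [hc]⟩
      have happ : (p ++ [a]) ++ t = p ++ a :: t := by simp
      by_cases hrep : PySem.Set.contains rep a = true
      · -- blacklisted: count ≥ 2, state unchanged
        have hge : 2 ≤ p.count a := by
          have h2a := h2 a
          rw [hrep] at h2a
          exact of_decide_eq_true h2a.symm
        have hs : stepB (once, rep) a = (once, rep) := by
          unfold stepB; rw [if_pos hrep]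
        rw [hs]
        have h1' : once = (p ++ [a]).filter (fun c => (p ++ [a]).count c == 1) := by
          rw [filter_push_ge2 p a hge]; exact h1
        have h2' : ∀ c, PySem.Set.contains rep c = decide (2 ≤ (p ++ [a]).count c) := by
          intro c
          rw [h2, count_append_singleton, decide_eq_decide]
          by_cases hc : c = a
          · rw [if_pos hc, hc]; omega
          · rw [if_neg hc]; omega
        have := ih (p ++ [a]) once rep h1' h2'
        rw [happ] at this
        exact this
      · have hlt : p.count a < 2 := by
          have h2a := h2 a
          simp only [Bool.not_eq_true] at hrep
          rw [hrep] at h2a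
          have := of_decide_eq_false h2a.symm
          omega
        by_cases honce : once.contains a = true
        · -- second occurrence: remove from once, blacklist
          have hc1 : p.count a = 1 := hmem.mp honce
          have hin : a ∈ once := List.contains_iff_mem.mp honce
          have hrm : (PySem.List.remove? once a).getD once = once.erase a := by
            rw [PySem.List.remove?_eq_some_erase once a hin]; rfl
          have hs : stepB (once, rep) a = (once.erase a, PySem.Set.add rep a) := by
            unfold stepB
            rw [if_neg (by simpa using hrep), if_pos honce, hrm]
          rw [hs]
          have hadd : PySem.Set.add rep a = rep ++ [a] := by
            unfold PySem.Set.add PySem.Set.contains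
            rw [if_neg (by simpa using hrep)]
          have h1' : once.erase a = (p ++ [a]).filter (fun c => (p ++ [a]).count c == 1) := by
            rw [filter_push_eq1 p a hc1, h1]
          have h2' : ∀ c, PySem.Set.contains (PySem.Set.add rep a) c
              = decide (2 ≤ (p ++ [a]).count c) := by
            intro c
            rw [hadd]
            show (rep ++ [a]).contains c = _
            rw [count_append_singleton]
            by_cases hc : c = a
            · rw [hc, if_pos rfl, hc1]
              simp
            · have hcc : (rep ++ [a]).contains c = rep.contains c := by
                simp [hc]
              rw [hcc]
              have h2c := h2 c
              rw [h2c, decide_eq_decide]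
              simp [hc]
          have := ih (p ++ [a]) (once.erase a) (PySem.Set.add rep a) h1' h2'
          rw [happ] at this
          exact this
        · -- first occurrence: append to once
          have hc0 : p.count a = 0 := by
            by_cases h01 : p.count a = 1
            · exact absurd (hmem.mpr h01) honce
            · omega
          have hs : stepB (once, rep) a = (once ++ [a], rep) := by
            unfold stepB
            rw [if_neg (by simpa using hrep), if_neg (by simpa using honce)]
          rw [hs]
          have h1' : once ++ [a] = (p ++ [a]).filter (fun c => (p ++ [a]).count c == 1) := by
            rw [filter_push_eq0 p a hc0, h1]
          have h2' : ∀ c, PySem.Set.contains rep c = decide (2 ≤ (p ++ [a]).count c) := by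
            intro c
            rw [h2, count_append_singleton, decide_eq_decide]
            by_cases hc : c = a
            · rw [if_pos hc, hc, hc0]; omega
            · rw [if_neg hc]; omega
          have := ih (p ++ [a]) (once ++ [a]) rep h1' h2'
          rw [happ] at this
          exact this

-- B's final once-list equals the count-1 characters of the input in order
theorem listsB (input : String) :
    (input.toList.foldl stepB ([], PySem.Set.empty)).1
      = input.toList.filter (fun c => input.toList.count c == 1) := by
  have := foldB_inv input.toList [] [] PySem.Set.empty rfl
    (fun c => by simp [PySem.Set.contains, PySem.Set.empty])
  simpa using this

-- ===== VERDICT (by name: the statement is the Claim_ definition above) =====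
theorem kthNonRepeat_spec : Claim_equal_kthNonRepeat := by
  intro input k _ _
  unfold Spec_kthNonRepeat kthNonRepeat kthNonRepeat_alt
  simp only [listsA input, listsB input]
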